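-- pv_equiv track=rewrite | github.com/Brian-McHugh/algoPrep | Python/diff_teams/diff_teams.py | diff_teams
-- ===== SOURCE A (Python) =====
-- def diff_teams(s):
--     chars = {}
--
--     for char in s:
--         if char in chars:
--             chars[char] += 1
--         else:
--             chars[char] = 1
--
--     teams = 99999999
--
--     for val in chars.values():
--         if val < teams:
--             teams = val
--
--     return teams
-- ===== SOURCE B (Python) =====
-- def diff_teams(s):
--     # Sort the string and scan runs of equal characters, keeping the smallest run length.
--     def go(t, best):
--         if not t:
--             return best
--         c = t[0]
--         k = 1
--         while k < len(t) and t[k] == c: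
--             k += 1
--         if k < best:
--             best = k
--         return go(t[k:], best)
--     return go(sorted(s), 99999999)
-- ===== Notes on version B (the rewrite author's own statement) =====
-- stated objective: alternative
-- what changed: B sorts the string and scans runs of equal characters (takewhile/recursion over the sorted tail) to find the smallest run length, instead of A's frequency-dict pass followed by a min loop over the values.
import Mathlib
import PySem

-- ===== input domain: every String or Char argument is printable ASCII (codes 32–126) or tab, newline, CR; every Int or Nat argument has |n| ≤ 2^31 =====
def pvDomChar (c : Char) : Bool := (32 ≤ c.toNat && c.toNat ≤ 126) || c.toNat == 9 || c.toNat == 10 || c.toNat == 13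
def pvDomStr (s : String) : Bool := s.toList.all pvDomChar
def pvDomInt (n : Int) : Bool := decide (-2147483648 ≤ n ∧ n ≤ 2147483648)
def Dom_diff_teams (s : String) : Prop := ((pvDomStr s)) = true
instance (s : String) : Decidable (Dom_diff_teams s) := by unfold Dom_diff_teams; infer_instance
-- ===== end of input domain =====

-- B replaces A's frequency-dict pass by sorting the string and scanning runs of equal
-- characters (alternative decomposition, not claimed faster); same value on every input.

-- ===== PORT A =====
def diff_teams (s : String) : Int :=
  let chars := s.toList.foldl
    (fun d c => if d.contains c then d.insert c (d.getD c 0 + 1) else d.insert c 1)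
    PySem.Dict.empty
  (PySem.Dict.values chars).foldl (fun teams val => if val < teams then val else teams) 99999999

-- ===== PORT B =====
-- hand-port of Source B's recursive run scanner: the inner `while` over equal chars is the
-- takeWhile/dropWhile split of the tail (exact: it scans forward while t[k] == c)
def pvGoB (t : List Char) (best : Int) : Int :=
  match t with
  | [] => best
  | c :: cs =>
      let run := cs.takeWhile (· == c)
      let rest := cs.dropWhile (· == c)
      let k : Int := (run.length : Int) + 1
      pvGoB rest (if k < best then k else best)
termination_by t.length
decreasing_by simpa using Nat.lt_succ_of_le (List.length_dropWhile_le (· == c) cs)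

def diff_teams_alt (s : String) : Int :=
  pvGoB (PySem.List.sorted s.toList (fun x => x) false) 99999999

-- ===== PRECONDITION & SPEC =====
def Spec_diff_teams (s : String) (out : Int) : Prop := out = diff_teams_alt s
instance (s : String) (out : Int) : Decidable (Spec_diff_teams s out) := by unfold Spec_diff_teams; infer_instance

-- ===== CLAIM (what is proved, stated in full; the proofs are below) =====
def Claim_equal_diff_teams : Prop := ∀ (s : String), Dom_diff_teams s → Spec_diff_teams s (diff_teams s)

-- ===== LEMMAS AND PROOFS =====

-- the min-accumulating loop body shared by both programs
def pvMinF (t v : Int) : Int := if v < t then v else t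

theorem pvMinF_comm (x y z : Int) : pvMinF (pvMinF z x) y = pvMinF (pvMinF z y) x := by
  unfold pvMinF; split_ifs <;> omega

-- A's result is the min-fold over the counts of the distinct characters
theorem diff_teams_eq_fold (s : String) :
    diff_teams s =
      ((PySem.Set.ofList s.toList).map (fun k => ((s.toList.count k : Nat) : Int))).foldl
        pvMinF 99999999 := by
  have hd : s.toList.foldl
      (fun d c => if d.contains c then d.insert c (d.getD c 0 + 1) else d.insert c 1)
      PySem.Dict.empty = PySem.Dict.counter s.toList := by
    rw [← PySem.Dict.foldl_insert_getD_add_one_eq_counter]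
    apply PySem.List.foldl_congr_mem
    intro acc x _
    by_cases h : acc.contains x = true
    · simp [h]
    · have h' : acc.contains x = false := by simpa using h
      simp [h', PySem.Dict.getD_of_not_contains acc 0 h']
  show (PySem.Dict.values _).foldl _ _ = _
  rw [hd]
  have hv : (PySem.Dict.counter s.toList).values
      = (PySem.Set.ofList s.toList).map (fun k => ((s.toList.count k : Nat) : Int)) := by
    show ((PySem.Dict.counter s.toList).items.map (·.2)) = _
    rw [PySem.Dict.items_counter, List.map_map]
    rfl
  rw [hv]
  rfl

-- B's scanner is the min-fold over the list of run lengths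
def pvRunLens : List Char → List Int
  | [] => []
  | c :: cs => ((cs.takeWhile (· == c)).length + 1 : Int) :: pvRunLens (cs.dropWhile (· == c))
termination_by t => t.length
decreasing_by simpa using Nat.lt_succ_of_le (List.length_dropWhile_le (· == c) cs)

theorem pvGoB_eq_fold (t : List Char) (best : Int) :
    pvGoB t best = (pvRunLens t).foldl pvMinF best := by
  fun_induction pvGoB t best with
  | case1 => simp [pvRunLens]
  | case2 best c cs run rest k ih =>
      rw [pvRunLens, List.foldl_cons]
      simpa [pvMinF] using ih

-- in a sorted list the occurrences of the head's value form a prefix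
theorem span_sorted (c : Char) (cs : List Char) (hp : cs.Pairwise (· ≤ ·))
    (hge : ∀ x ∈ cs, c ≤ x) :
    (cs.takeWhile (· == c)).length = cs.count c ∧
      cs.dropWhile (· == c) = cs.filter (fun x => !(x == c)) := by
  induction cs with
  | nil => simp
  | cons d ds ih =>
      by_cases hd : d = c
      · subst hd
        have h1 := (List.pairwise_cons.mp hp).2
        have h2 : ∀ x ∈ ds, d ≤ x := (List.pairwise_cons.mp hp).1
        obtain ⟨ht, hdw⟩ := ih h1 h2
        constructor
        · simp [ht, List.count_cons_self]
        · simp [hdw]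
      · have hcd : c < d := lt_of_le_of_ne (hge d (by simp)) (Ne.symm hd)
        have hnot : ∀ x ∈ ds, c < x := by
          intro x hx
          exact lt_of_lt_of_le hcd ((List.pairwise_cons.mp hp).1 x hx)
        have hdc : (d == c) = false := beq_eq_false_iff_ne.mpr hd
        have hne : ∀ x ∈ ds, (x == c) = false :=
          fun x hx => beq_eq_false_iff_ne.mpr (ne_of_gt (hnot x hx))
        constructor
        · have hc0 : (d :: ds).count c = 0 := by
            rw [List.count_eq_zero]
            intro hmem
            rcases List.mem_cons.mp hmem with h | h
            · exact hd h.symm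
            · exact absurd rfl (ne_of_gt (hnot c h))
          simp [hdc, hc0]
        · rw [List.dropWhile_cons_of_neg (by simp [hdc]),
            List.filter_cons_of_pos (by simp [hdc]),
            List.filter_eq_self.mpr (fun x hx => by simp [hne x hx])]

-- on a sorted list the run lengths are a permutation of the distinct-character counts
theorem runLens_perm (S : List Char) (h : S.Pairwise (· ≤ ·)) :
    (pvRunLens S).Perm ((PySem.Set.ofList S).map (fun k => ((S.count k : Nat) : Int))) := by
  fun_induction pvRunLens S with
  | case1 => simp
  | case2 c cs ih =>
      have h1 : cs.Pairwise (· ≤ ·) := (List.pairwise_cons.mp h).2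
      have h2 : ∀ x ∈ cs, c ≤ x := (List.pairwise_cons.mp h).1
      obtain ⟨ht, hdw⟩ := span_sorted c cs h1 h2
      set rest := cs.dropWhile (· == c) with hrest
      have hrp : rest.Pairwise (· ≤ ·) := by rw [hdw] at *; exact h1.filter _
      have hcnotin : c ∉ rest := by
        rw [hdw]; intro hm
        simpa using (List.mem_filter.mp hm).2
      have hperm1 : (PySem.Set.ofList (c :: cs)).Perm (c :: PySem.Set.ofList rest) := by
        rw [List.perm_ext_iff_of_nodup (PySem.Set.nodup_ofList _)
          (List.nodup_cons.mpr ⟨fun hm => hcnotin ((PySem.Set.mem_ofList _ _).mp hm),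
            PySem.Set.nodup_ofList _⟩)]
        intro a
        simp only [PySem.Set.mem_ofList, List.mem_cons, hdw, List.mem_filter]
        constructor
        · rintro (rfl | ha)
          · exact Or.inl rfl
          · by_cases hac : a = c
            · exact Or.inl hac
            · exact Or.inr ⟨ha, by simpa using hac⟩
        · rintro (rfl | ⟨ha, _⟩)
          · exact Or.inl rfl
          · exact Or.inr ha
      have hcount : ∀ k ∈ PySem.Set.ofList rest,
          (((c :: cs).count k : Nat) : Int) = ((rest.count k : Nat) : Int) := by
        intro k hk
        have hkc : k ≠ c := fun hkc => hcnotin (hkc ▸ (PySem.Set.mem_ofList _ _).mp hk)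
        rw [hdw, List.count_filter (p := fun x => !(x == c)) (a := k)
          (by show (!(k == c)) = true; rw [beq_eq_false_iff_ne.mpr hkc]; rfl),
          List.count_cons]
        simp [Ne.symm hkc]
      refine List.Perm.trans ?_ ((hperm1.map _).symm)
      rw [List.map_cons]
      have hhead : ((cs.takeWhile (· == c)).length + 1 : Int)
          = (((c :: cs).count c : Nat) : Int) := by
        rw [List.count_cons_self, ht]; push_cast; ring
      rw [hhead]
      refine List.Perm.cons _ ?_
      rw [List.map_congr_left (fun a ha => hcount a ha)]
      exact ih hrp

-- ===== VERDICT (by name: the statement is the Claim_ definition above) =====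
theorem diff_teams_spec : Claim_equal_diff_teams := by
  intro s _
  unfold Spec_diff_teams
  set L := s.toList with hL
  set S := PySem.List.sorted L (fun x => x) false with hS
  have hSL : S.Perm L := PySem.List.sorted_perm L (fun x => x) false
  have hSp : S.Pairwise (· ≤ ·) := PySem.List.sorted_pairwise L (fun x => x)
  have hofs : (PySem.Set.ofList S).Perm (PySem.Set.ofList L) := by
    rw [List.perm_ext_iff_of_nodup (PySem.Set.nodup_ofList _) (PySem.Set.nodup_ofList _)]
    intro a
    rw [PySem.Set.mem_ofList, PySem.Set.mem_ofList, hSL.mem_iff]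
  have hBperm : (pvRunLens S).Perm ((PySem.Set.ofList L).map (fun k => ((L.count k : Nat) : Int))) := by
    refine ((runLens_perm S hSp).trans ?_)
    rw [List.map_congr_left (l := PySem.Set.ofList S)
      (g := fun k => ((L.count k : Nat) : Int)) (fun a _ => by rw [hSL.count_eq a])]
    exact hofs.map _
  rw [diff_teams_eq_fold, show diff_teams_alt s = pvGoB S 99999999 from rfl, pvGoB_eq_fold]
  exact (hBperm.foldl_eq' (fun x _ y _ z => pvMinF_comm x y z) 99999999).symm
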